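-- pv_equiv track=rewrite | github.com/dewanshshekhar/AURA-Autonomous-Unified-Risk-Auditor | scripts/verify_gitignore.py | check_essential_dirs_have_content
-- ===== SOURCE A (Python) =====
-- ESSENTIAL_DIRS = [
--     'app',
--     'app/agent',
--     'app/tool',
--     'app/llm',
--     'app/memory',
--     'app/flow',
--     'config',
--     'scripts',
--     'examples'
--     # agent_learning is excluded as it contains private user data
-- ]
--
-- def check_essential_dirs_have_content(included_files):
--     """
--     Check if essential directories have content
--     """
--     empty_dirs = []
--
--     for dir_path in ESSENTIAL_DIRS:
--         normalized_dir = dir_path.replace('\\', '/')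
--         dir_has_files = any(file.startswith(f"{normalized_dir}/") for file in included_files)
--
--         if not dir_has_files:
--             empty_dirs.append(normalized_dir)
--
--     return empty_dirs
-- ===== SOURCE B (Python) =====
-- ESSENTIAL_DIRS = [
--     'app',
--     'app/agent',
--     'app/tool',
--     'app/llm',
--     'app/memory',
--     'app/flow',
--     'config',
--     'scripts',
--     'examples'
--     # agent_learning is excluded as it contains private user data
-- ]
--
-- def check_essential_dirs_have_content(included_files):
--     """
--     Check if essential directories have content
--     """
--     # One pass over the files: collect every slash-delimited ancestor prefix,
--     # then a single membership pass over ESSENTIAL_DIRS.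
--     present = set()
--     for file in included_files:
--         acc = ""
--         for ch in file:
--             if ch == '/':
--                 present.add(acc)
--             acc += ch
--     return [d for d in ESSENTIAL_DIRS if d not in present]
-- ===== Notes on version B (the rewrite author's own statement) =====
-- stated objective: alternative
-- what changed: Instead of scanning all files once per essential directory with startswith tests, B makes one pass over the files collecting every slash-delimited ancestor prefix into a set, then does a single membership pass over ESSENTIAL_DIRS.
import Mathlib
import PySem

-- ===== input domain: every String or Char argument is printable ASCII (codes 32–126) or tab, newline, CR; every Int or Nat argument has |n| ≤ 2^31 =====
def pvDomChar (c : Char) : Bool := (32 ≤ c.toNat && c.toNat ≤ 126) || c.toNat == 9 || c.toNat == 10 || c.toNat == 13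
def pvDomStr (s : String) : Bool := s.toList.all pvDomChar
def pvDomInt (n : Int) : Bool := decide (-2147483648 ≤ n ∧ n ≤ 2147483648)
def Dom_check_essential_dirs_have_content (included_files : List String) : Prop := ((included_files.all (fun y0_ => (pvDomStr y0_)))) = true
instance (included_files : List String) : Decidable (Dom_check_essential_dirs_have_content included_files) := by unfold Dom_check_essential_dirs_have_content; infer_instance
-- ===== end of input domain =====

-- B replaces A's per-directory scan of all files (startswith tests) by one pass over the files
-- collecting every slash-delimited ancestor prefix into a set, then a single membership pass.

-- the module constant ESSENTIAL_DIRS (shared context of both programs)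
def pvEssentialDirs : List String :=
  ["app", "app/agent", "app/tool", "app/llm", "app/memory", "app/flow", "config", "scripts", "examples"]

-- ===== PORT A =====
def check_essential_dirs_have_content (included_files : List String) : List String :=
  pvEssentialDirs.foldl (fun empty_dirs dir_path =>
    let normalized_dir := PySem.Str.replace dir_path "\\" "/"
    let dir_has_files := included_files.any (fun file => PySem.Str.startswith file (normalized_dir ++ "/"))
    if dir_has_files then empty_dirs else empty_dirs ++ [normalized_dir]) []

-- ===== PORT B =====
-- inner loop body of `for ch in file:`; Python's growing str accumulator `acc` is kept as a
-- List Char (PySem string primitives are defined on List Char), turned into a String when added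
def pvScanStep (p : PySem.Set String × List Char) (ch : Char) : PySem.Set String × List Char :=
  if ch = '/' then (PySem.Set.add p.1 (String.ofList p.2), p.2 ++ [ch]) else (p.1, p.2 ++ [ch])

-- the two nested `for` loops of B building `present`
def pvPresent (included_files : List String) : PySem.Set String :=
  included_files.foldl (fun present file => (file.toList.foldl pvScanStep (present, [])).1) PySem.Set.empty

def check_essential_dirs_have_content_alt (included_files : List String) : List String :=
  let present := pvPresent included_files
  pvEssentialDirs.filter (fun d => !(PySem.Set.contains present d))

-- ===== PRECONDITION & SPEC =====
def Spec_check_essential_dirs_have_content (included_files : List String) (out : List String) : Prop := out = check_essential_dirs_have_content_alt included_files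
instance (included_files : List String) (out : List String) : Decidable (Spec_check_essential_dirs_have_content included_files out) := by unfold Spec_check_essential_dirs_have_content; infer_instance

-- ===== CLAIM (what is proved, stated in full; the proofs are below) =====
def Claim_equal_check_essential_dirs_have_content : Prop := ∀ (included_files : List String), Dom_check_essential_dirs_have_content included_files → Spec_check_essential_dirs_have_content included_files (check_essential_dirs_have_content included_files)

-- ===== LEMMAS AND PROOFS =====

-- the inner character scan: what ends up in the set
lemma pv_scan_mem (l : List Char) (s : PySem.Set String) (acc : List Char) (d : String) :
    d ∈ (l.foldl pvScanStep (s, acc)).1 ↔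
      d ∈ s ∨ ∃ (i : Nat) (_ : i < l.length), l[i] = '/' ∧ d.toList = acc ++ l.take i := by
  induction l generalizing s acc with
  | nil => simp
  | cons c l ih =>
    by_cases hc : c = '/'
    · subst hc
      rw [List.foldl_cons]
      show d ∈ (l.foldl pvScanStep (PySem.Set.add s (String.ofList acc), acc ++ ['/'])).1 ↔ _
      rw [ih]
      constructor
      · rintro (h | ⟨i, hi, hsl, hd⟩)
        · rcases (PySem.Set.mem_add _ _ _).1 h with h | h
          · exact Or.inl h
          · refine Or.inr ⟨0, by simp, by simp, by simp [h]⟩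
        · exact Or.inr ⟨i + 1, by simpa using hi, by simpa using hsl, by simpa using hd⟩
      · rintro (h | ⟨i, hi, hsl, hd⟩)
        · exact Or.inl ((PySem.Set.mem_add _ _ _).2 (Or.inl h))
        · match i with
          | 0 =>
            left
            refine (PySem.Set.mem_add _ _ _).2 (Or.inr ?_)
            apply String.ext
            simpa using hd
          | i + 1 =>
            right
            exact ⟨i, by simpa using hi, by simpa using hsl, by simpa using hd⟩
    · rw [List.foldl_cons,
        show pvScanStep (s, acc) c = (s, acc ++ [c]) from by simp [pvScanStep, hc], ih]
      constructor
      · rintro (h | ⟨i, hi, hsl, hd⟩)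
        · exact Or.inl h
        · exact Or.inr ⟨i + 1, by simpa using hi, by simpa using hsl, by simpa using hd⟩
      · rintro (h | ⟨i, hi, hsl, hd⟩)
        · exact Or.inl h
        · match i with
          | 0 => simp at hsl; exact absurd hsl hc
          | i + 1 =>
            exact Or.inr ⟨i, by simpa using hi, by simpa using hsl, by simpa using hd⟩

-- slash positions ↔ "d ++ '/' is a prefix"
lemma pv_prefix_iff (l : List Char) (d : String) :
    (∃ (i : Nat) (_ : i < l.length), l[i] = '/' ∧ d.toList = l.take i) ↔ (d.toList ++ ['/']) <+: l := by
  constructor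
  · rintro ⟨i, hi, hsl, hd⟩
    have : l.take (i + 1) = d.toList ++ ['/'] := by
      rw [List.take_add_one]
      simp [hd, hsl, List.getElem?_eq_getElem hi]
    rw [← this]
    exact List.take_prefix _ _
  · rintro ⟨t, ht⟩
    subst ht
    refine ⟨d.toList.length, by simp, ?_, ?_⟩
    · simp only [List.append_assoc, List.singleton_append]
      rw [List.getElem_append_right (Nat.le_refl _)]
      simp
    · simp only [List.append_assoc, List.singleton_append]
      rw [List.take_left]

lemma pv_present_mem (files : List String) (d : String) :
    d ∈ pvPresent files ↔ ∃ f ∈ files, (d.toList ++ ['/']) <+: f.toList := by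
  unfold pvPresent
  have h : ∀ (s : PySem.Set String),
      d ∈ files.foldl (fun present file => (file.toList.foldl pvScanStep (present, ([] : List Char))).1) s ↔
        d ∈ s ∨ ∃ f ∈ files, (d.toList ++ ['/']) <+: f.toList := by
    induction files with
    | nil => simp
    | cons f fs ih =>
      intro s
      rw [List.foldl_cons, ih, pv_scan_mem]
      simp only [List.nil_append, pv_prefix_iff, List.mem_cons]
      constructor
      · rintro ((h | h) | ⟨g, hg, hp⟩)
        · exact Or.inl h
        · exact Or.inr ⟨f, Or.inl rfl, h⟩
        · exact Or.inr ⟨g, Or.inr hg, hp⟩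
      · rintro (h | ⟨g, (rfl | hg), hp⟩)
        · exact Or.inl (Or.inl h)
        · exact Or.inl (Or.inr hp)
        · exact Or.inr ⟨g, hg, hp⟩
  have := h PySem.Set.empty
  simpa [PySem.Set.empty] using this

lemma pv_any_startswith (files : List String) (d : String) :
    (files.any (fun f => PySem.Str.startswith f (d ++ "/"))) = true ↔
      ∃ f ∈ files, (d.toList ++ ['/']) <+: f.toList := by
  simp only [List.any_eq_true, PySem.Str.startswith_eq, PySem.Chars.startswith_iff]
  constructor
  · rintro ⟨f, hf, hp⟩
    exact ⟨f, hf, by simpa using hp⟩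
  · rintro ⟨f, hf, hp⟩
    exact ⟨f, hf, by simpa using hp⟩

-- the two membership tests agree, as Booleans
lemma pv_key (files : List String) (d : String) :
    (files.any (fun f => PySem.Str.startswith f (d ++ "/"))) = PySem.Set.contains (pvPresent files) d := by
  rw [Bool.eq_iff_iff, pv_any_startswith, PySem.Set.contains_iff, pv_present_mem]

-- ===== VERDICT (by name: the statement is the Claim_ definition above) =====
-- A's directory loop, rewritten as a filter once every replace is the identity on its elements
lemma pv_fold_eq (files : List String) (dirs : List String) (acc : List String)
    (h : ∀ dp ∈ dirs, PySem.Str.replace dp "\\" "/" = dp) :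
    dirs.foldl (fun empty_dirs dir_path =>
      if (files.any fun file =>
            PySem.Str.startswith file (PySem.Str.replace dir_path "\\" "/" ++ "/")) = true
      then empty_dirs else empty_dirs ++ [PySem.Str.replace dir_path "\\" "/"]) acc
    = acc ++ dirs.filter (fun d => !(PySem.Set.contains (pvPresent files) d)) := by
  induction dirs generalizing acc with
  | nil => simp
  | cons dp dirs ih =>
    rw [List.foldl_cons, h dp (by simp), pv_key files dp,
      ih _ (fun x hx => h x (by simp [hx])), List.filter_cons]
    cases hc : PySem.Set.contains (pvPresent files) dp
    · simp [hc]
    · simp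

theorem check_essential_dirs_have_content_spec : Claim_equal_check_essential_dirs_have_content := by
  intro included_files _
  unfold Spec_check_essential_dirs_have_content
  unfold check_essential_dirs_have_content check_essential_dirs_have_content_alt
  have hrep : ∀ dp ∈ pvEssentialDirs, PySem.Str.replace dp "\\" "/" = dp := by decide
  show List.foldl (fun empty_dirs dir_path =>
      if (included_files.any fun file =>
            PySem.Str.startswith file (PySem.Str.replace dir_path "\\" "/" ++ "/")) = true
      then empty_dirs else empty_dirs ++ [PySem.Str.replace dir_path "\\" "/"]) [] pvEssentialDirs =
    List.filter (fun d => !(PySem.Set.contains (pvPresent included_files) d)) pvEssentialDirs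
  rw [pv_fold_eq included_files pvEssentialDirs [] hrep]
  simp
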